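-- pv_equiv track=rewrite | github.com/AfexGenesis/AfexCore | assets/dna-sequencer.py | apply_amino_acid_highlighting
-- ===== SOURCE A (Python) =====
-- from typing import Dict, List, Tuple
--
-- def apply_amino_acid_highlighting(formatted_lines: List[str], sequence: str, target_amino_acids: str) -> List[str]:
--     """Apply highlighting to codons that code for target amino acids"""
--     # Standard genetic code
--     genetic_code = {
--         'TTT': 'F', 'TTC': 'F', 'TTA': 'L', 'TTG': 'L',
--         'TCT': 'S', 'TCC': 'S', 'TCA': 'S', 'TCG': 'S',
--         'TAT': 'Y', 'TAC': 'Y', 'TAA': '*', 'TAG': '*',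
--         'TGT': 'C', 'TGC': 'C', 'TGA': '*', 'TGG': 'W',
--         'CTT': 'L', 'CTC': 'L', 'CTA': 'L', 'CTG': 'L',
--         'CCT': 'P', 'CCC': 'P', 'CCA': 'P', 'CCG': 'P',
--         'CAT': 'H', 'CAC': 'H', 'CAA': 'Q', 'CAG': 'Q',
--         'CGT': 'R', 'CGC': 'R', 'CGA': 'R', 'CGG': 'R',
--         'ATT': 'I', 'ATC': 'I', 'ATA': 'I', 'ATG': 'M',
--         'ACT': 'T', 'ACC': 'T', 'ACA': 'T', 'ACG': 'T',
--         'AAT': 'N', 'AAC': 'N', 'AAA': 'K', 'AAG': 'K',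
--         'AGT': 'S', 'AGC': 'S', 'AGA': 'R', 'AGG': 'R',
--         'GTT': 'V', 'GTC': 'V', 'GTA': 'V', 'GTG': 'V',
--         'GCT': 'A', 'GCC': 'A', 'GCA': 'A', 'GCG': 'A',
--         'GAT': 'D', 'GAC': 'D', 'GAA': 'E', 'GAG': 'E',
--         'GGT': 'G', 'GGC': 'G', 'GGA': 'G', 'GGG': 'G'
--     }
--
--     # Get target amino acids
--     if target_amino_acids == 'ALL':
--         target_aas = set(genetic_code.values()) - {'*'}  # All except stop codons
--     elif target_amino_acids == 'START':
--         target_aas = {'M'}  # Start codon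
--     elif target_amino_acids == 'STOP':
--         target_aas = {'*'}  # Stop codons
--     else:
--         target_aas = {target_amino_acids}
--
--     # Find codons that code for target amino acids
--     target_codons = []
--     for codon, aa in genetic_code.items():
--         if aa in target_aas:
--             target_codons.append(codon)
--
--     # Find positions of target codons in the sequence
--     highlight_positions = set()
--     clean_sequence = sequence.replace(' ', '').replace('\n', '')
--
--     for i in range(0, len(clean_sequence) - 2, 3):
--         codon = clean_sequence[i:i+3]
--         if len(codon) == 3 and codon in target_codons:
--             # Mark all three positions of this codon for highlighting
--             highlight_positions.update([i, i+1, i+2])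
--
--     # Apply highlighting to formatted lines
--     highlighted_lines = []
--     sequence_position = 0
--
--     for line in formatted_lines:
--         parts = line.split(': ', 1)
--         if len(parts) == 2:
--             line_num, sequence_part = parts
--             highlighted_sequence = ""
--
--             # Process each character in the sequence part
--             for char in sequence_part:
--                 if char in 'ATGCN':
--                     if sequence_position in highlight_positions:
--                         # Highlight this nucleotide
--                         highlighted_sequence += f'<span class="bg-yellow-300 text-black font-bold px-0.5 rounded">{char}</span>'
--                     else:
--                         highlighted_sequence += char
--                     sequence_position += 1
--                 else:
--                     # Space or other character
--                     highlighted_sequence += char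
--
--             highlighted_lines.append(f"{line_num}: {highlighted_sequence}")
--         else:
--             highlighted_lines.append(line)
--
--     return highlighted_lines
-- ===== SOURCE B (Python) =====
-- _BASES = 'TCAG'
-- # amino acid for codon b1 b2 b3 at index 16*i(b1) + 4*i(b2) + i(b3), bases in TCAG order
-- _AAS = 'FFLLSSSSYY**CC*WLLLLPPPPHHQQRRRRIIIMTTTTNNKKSSRRVVVVAAAADDEEGGGG'
--
--
-- def _codon_aa(codon):
--     """Amino acid coded by a codon over TCAG, else None (table lookup, no dict)."""
--     idx = 0
--     for b in codon:
--         i = _BASES.find(b)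
--         if i < 0:
--             return None
--         idx = idx * 4 + i
--     return _AAS[idx]
--
--
-- def apply_amino_acid_highlighting(formatted_lines, sequence, target_amino_acids):
--     """Apply highlighting to codons that code for target amino acids.
--
--     Single-pass variant: the genetic-code dict, the target-codon list and the
--     highlight-position set are all gone; each highlightable nucleotide slices
--     its own codon and resolves it through an indexed 64-char table.
--     """
--     if target_amino_acids == 'ALL':
--         targets = set(_AAS) - {'*'}
--     elif target_amino_acids == 'START':
--         targets = {'M'}
--     elif target_amino_acids == 'STOP':
--         targets = {'*'}
--     else:
--         targets = {target_amino_acids}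
--
--     clean = sequence.replace(' ', '').replace('\n', '')
--
--     out = []
--     pos = 0
--     for line in formatted_lines:
--         parts = line.split(': ', 1)
--         if len(parts) != 2:
--             out.append(line)
--             continue
--         head, tail = parts
--         chunks = []
--         for ch in tail:
--             if ch in 'ATGCN':
--                 start = pos // 3 * 3
--                 codon = clean[start:start + 3]
--                 if len(codon) == 3 and _codon_aa(codon) in targets:
--                     chunks.append('<span class="bg-yellow-300 text-black font-bold px-0.5 rounded">' + ch + '</span>')
--                 else:
--                     chunks.append(ch)
--                 pos += 1
--             else:
--                 chunks.append(ch)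
--         out.append(head + ': ' + ''.join(chunks))
--     return out
-- ===== Notes on version B (the rewrite author's own statement) =====
-- stated objective: alternative
-- what changed: A builds a 64-entry codon->amino-acid dict, filters it into a target-codon list and precomputes a set of all highlight positions before rewriting the lines; B drops the dict and both precompute passes entirely: in the single line-rewriting loop each nucleotide slices its own codon clean[start:start+3] (start = pos//3*3) and resolves it by base-4 indexing into a 64-character amino-acid table string, checking the result against the target set.
import Mathlib
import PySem

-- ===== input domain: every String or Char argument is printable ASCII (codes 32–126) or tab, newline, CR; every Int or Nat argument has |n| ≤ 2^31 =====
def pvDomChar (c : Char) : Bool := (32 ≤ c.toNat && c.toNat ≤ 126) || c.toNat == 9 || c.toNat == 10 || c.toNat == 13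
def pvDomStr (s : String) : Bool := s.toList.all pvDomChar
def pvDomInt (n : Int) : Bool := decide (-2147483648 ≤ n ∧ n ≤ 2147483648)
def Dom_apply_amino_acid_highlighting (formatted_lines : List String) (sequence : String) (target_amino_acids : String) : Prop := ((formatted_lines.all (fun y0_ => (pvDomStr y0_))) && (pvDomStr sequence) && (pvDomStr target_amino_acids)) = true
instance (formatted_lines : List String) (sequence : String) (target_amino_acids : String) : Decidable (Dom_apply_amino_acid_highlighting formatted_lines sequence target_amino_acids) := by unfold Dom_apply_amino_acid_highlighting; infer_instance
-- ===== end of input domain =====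

-- B drops A's codon dict and its two precompute passes (target-codon list + highlight-position
-- set): each nucleotide slices its own codon and resolves it via a base-4 indexed 64-char table;
-- same return value, no speed claim.

-- ===== PORT A =====
-- the 64-entry genetic-code dict literal (keys/values as code-point lists)
def pvGeneticCode : PySem.Dict (List Char) (List Char) := PySem.Dict.mk [
  (['T', 'T', 'T'], ['F']),
  (['T', 'T', 'C'], ['F']),
  (['T', 'T', 'A'], ['L']),
  (['T', 'T', 'G'], ['L']),
  (['T', 'C', 'T'], ['S']),
  (['T', 'C', 'C'], ['S']),
  (['T', 'C', 'A'], ['S']),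
  (['T', 'C', 'G'], ['S']),
  (['T', 'A', 'T'], ['Y']),
  (['T', 'A', 'C'], ['Y']),
  (['T', 'A', 'A'], ['*']),
  (['T', 'A', 'G'], ['*']),
  (['T', 'G', 'T'], ['C']),
  (['T', 'G', 'C'], ['C']),
  (['T', 'G', 'A'], ['*']),
  (['T', 'G', 'G'], ['W']),
  (['C', 'T', 'T'], ['L']),
  (['C', 'T', 'C'], ['L']),
  (['C', 'T', 'A'], ['L']),
  (['C', 'T', 'G'], ['L']),
  (['C', 'C', 'T'], ['P']),
  (['C', 'C', 'C'], ['P']),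
  (['C', 'C', 'A'], ['P']),
  (['C', 'C', 'G'], ['P']),
  (['C', 'A', 'T'], ['H']),
  (['C', 'A', 'C'], ['H']),
  (['C', 'A', 'A'], ['Q']),
  (['C', 'A', 'G'], ['Q']),
  (['C', 'G', 'T'], ['R']),
  (['C', 'G', 'C'], ['R']),
  (['C', 'G', 'A'], ['R']),
  (['C', 'G', 'G'], ['R']),
  (['A', 'T', 'T'], ['I']),
  (['A', 'T', 'C'], ['I']),
  (['A', 'T', 'A'], ['I']),
  (['A', 'T', 'G'], ['M']),
  (['A', 'C', 'T'], ['T']),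
  (['A', 'C', 'C'], ['T']),
  (['A', 'C', 'A'], ['T']),
  (['A', 'C', 'G'], ['T']),
  (['A', 'A', 'T'], ['N']),
  (['A', 'A', 'C'], ['N']),
  (['A', 'A', 'A'], ['K']),
  (['A', 'A', 'G'], ['K']),
  (['A', 'G', 'T'], ['S']),
  (['A', 'G', 'C'], ['S']),
  (['A', 'G', 'A'], ['R']),
  (['A', 'G', 'G'], ['R']),
  (['G', 'T', 'T'], ['V']),
  (['G', 'T', 'C'], ['V']),
  (['G', 'T', 'A'], ['V']),
  (['G', 'T', 'G'], ['V']),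
  (['G', 'C', 'T'], ['A']),
  (['G', 'C', 'C'], ['A']),
  (['G', 'C', 'A'], ['A']),
  (['G', 'C', 'G'], ['A']),
  (['G', 'A', 'T'], ['D']),
  (['G', 'A', 'C'], ['D']),
  (['G', 'A', 'A'], ['E']),
  (['G', 'A', 'G'], ['E']),
  (['G', 'G', 'T'], ['G']),
  (['G', 'G', 'C'], ['G']),
  (['G', 'G', 'A'], ['G']),
  (['G', 'G', 'G'], ['G']),
]

-- stage 1 of A: resolve target_amino_acids to the set target_aas
def pvTargetAAs (target_amino_acids : String) : PySem.Set (List Char) :=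
  if target_amino_acids.toList == "ALL".toList then
    PySem.Set.diff (PySem.Set.ofList pvGeneticCode.values) [['*']]
  else if target_amino_acids.toList == "START".toList then PySem.Set.ofList [['M']]
  else if target_amino_acids.toList == "STOP".toList then PySem.Set.ofList [['*']]
  else PySem.Set.ofList [target_amino_acids.toList]

-- clean_sequence = sequence.replace(' ', '').replace('\n', '')  (same line in both Pythons)
def pvClean (sequence : String) : List Char :=
  PySem.Chars.replace (PySem.Chars.replace sequence.toList [' '] []) ['\n'] []

-- the f-string span wrapper of A
def pvSpan (c : Char) : List Char :=
  "<span class=\"bg-yellow-300 text-black font-bold px-0.5 rounded\">".toList ++ [c] ++ "</span>".toList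

-- target_codons = [codon for codon, aa in genetic_code.items() if aa in target_aas]
def pvTargetCodons (aas : PySem.Set (List Char)) : List (List Char) :=
  pvGeneticCode.items.foldl (fun acc kv => if aas.contains kv.2 then acc ++ [kv.1] else acc) []

-- the loop-body test: codon = clean[i:i+3]; len(codon) == 3 and codon in target_codons
def pvCondA (clean : List Char) (tcs : List (List Char)) (i : Int) : Bool :=
  let codon := PySem.List.slice clean (some i) (some (i + 3))
  codon.length == 3 && tcs.contains codon

-- for i in range(0, len(clean)-2, 3): … highlight_positions.update([i, i+1, i+2])
def pvHighlights (clean : List Char) (tcs : List (List Char)) : PySem.Set Int :=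
  (PySem.List.pyRange 0 ((clean.length : Int) - 2) 3).foldl
    (fun hp i => if pvCondA clean tcs i then PySem.Set.update hp [i, i + 1, i + 2] else hp)
    PySem.Set.empty

-- per-character body of A's inner loop; state = (highlighted_sequence as chars, sequence_position)
def pvCharStepA (hp : PySem.Set Int) (st : List Char × Int) (ch : Char) : List Char × Int :=
  if "ATGCN".toList.contains ch then
    (if hp.contains st.2 then st.1 ++ pvSpan ch else st.1 ++ [ch], st.2 + 1)
  else (st.1 ++ [ch], st.2)

-- per-line body of A's outer loop; state = (highlighted_lines, sequence_position)
-- string concatenation f"{line_num}: {…}" is ported as List Char append (exact)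
def pvLineStepA (hp : PySem.Set Int) (st : List String × Int) (line : String) : List String × Int :=
  match (PySem.Str.splitMax? line ": " 1).getD [] with
  | [line_num, seq_part] =>
      let r := seq_part.toList.foldl (pvCharStepA hp) ([], st.2)
      (st.1 ++ [String.ofList (line_num.toList ++ ':' :: ' ' :: r.1)], r.2)
  | _ => (st.1 ++ [line], st.2)

def apply_amino_acid_highlighting (formatted_lines : List String) (sequence : String) (target_amino_acids : String) : List String :=
  let target_aas := pvTargetAAs target_amino_acids
  let target_codons := pvTargetCodons target_aas
  let clean := pvClean sequence
  let hp := pvHighlights clean target_codons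
  (formatted_lines.foldl (pvLineStepA hp) ([], 0)).1

-- ===== PORT B =====
-- _BASES = 'TCAG'
def pvBases : List Char := ['T', 'C', 'A', 'G']
-- _AAS: amino acid for codon at base-4 index over TCAG
def pvAAS : List Char := "FFLLSSSSYY**CC*WLLLLPPPPHHQQRRRRIIIMTTTTNNKKSSRRVVVVAAAADDEEGGGG".toList

-- def _codon_aa(codon): idx accumulator loop with early return None on i < 0; then _AAS[idx]
-- (the final _AAS[idx] is PySem.List.pyGet?; it is in range whenever the loop ran on 3 bases)
def pvCodonAA : List Char → Int → Option (List Char)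
  | [], idx => (PySem.List.pyGet? pvAAS idx).map (fun c => [c])
  | b :: rest, idx =>
      let i := PySem.Chars.find pvBases [b]
      if i < 0 then none else pvCodonAA rest (idx * 4 + i)

-- B's stage 1: targets, with 'ALL' taken from the table string
def pvTargetsB (target_amino_acids : String) : PySem.Set (List Char) :=
  if target_amino_acids.toList == "ALL".toList then
    PySem.Set.diff (PySem.Set.ofList (pvAAS.map (fun c => [c]))) [['*']]
  else if target_amino_acids.toList == "START".toList then PySem.Set.ofList [['M']]
  else if target_amino_acids.toList == "STOP".toList then PySem.Set.ofList [['*']]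
  else PySem.Set.ofList [target_amino_acids.toList]

-- B's span string concatenation '<span …>' + ch + '</span>'
def pvSpanB (c : Char) : List Char :=
  "<span class=\"bg-yellow-300 text-black font-bold px-0.5 rounded\">".toList ++ [c] ++ "</span>".toList

-- B's per-nucleotide test: start = pos // 3 * 3; codon = clean[start:start+3];
-- len(codon) == 3 and _codon_aa(codon) in targets
def pvCondB (clean : List Char) (targets : PySem.Set (List Char)) (pos : Int) : Bool :=
  let start := PySem.Int.floordiv pos 3 * 3
  let codon := PySem.List.slice clean (some start) (some (start + 3))
  codon.length == 3 &&
    (match pvCodonAA codon 0 with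
     | some aa => targets.contains aa
     | none => false)

-- per-character body of B's loop; state = (chunks, pos)
def pvCharStepB (clean : List Char) (targets : PySem.Set (List Char))
    (st : List (List Char) × Int) (ch : Char) : List (List Char) × Int :=
  if "ATGCN".toList.contains ch then
    (if pvCondB clean targets st.2 then st.1 ++ [pvSpanB ch] else st.1 ++ [[ch]], st.2 + 1)
  else (st.1 ++ [[ch]], st.2)

-- per-line body of B's loop; ''.join(chunks) is PySem.Chars.join []
def pvLineStepB (clean : List Char) (targets : PySem.Set (List Char))
    (st : List String × Int) (line : String) : List String × Int :=
  match (PySem.Str.splitMax? line ": " 1).getD [] with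
  | [head, tail] =>
      let r := tail.toList.foldl (pvCharStepB clean targets) ([], st.2)
      (st.1 ++ [String.ofList (head.toList ++ ':' :: ' ' :: PySem.Chars.join [] r.1)], r.2)
  | _ => (st.1 ++ [line], st.2)

def apply_amino_acid_highlighting_alt (formatted_lines : List String) (sequence : String) (target_amino_acids : String) : List String :=
  let targets := pvTargetsB target_amino_acids
  let clean := pvClean sequence
  (formatted_lines.foldl (pvLineStepB clean targets) ([], 0)).1

-- ===== PRECONDITION & SPEC =====
def Spec_apply_amino_acid_highlighting (formatted_lines : List String) (sequence : String) (target_amino_acids : String) (out : List String) : Prop := out = apply_amino_acid_highlighting_alt formatted_lines sequence target_amino_acids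
instance (formatted_lines : List String) (sequence : String) (target_amino_acids : String) (out : List String) : Decidable (Spec_apply_amino_acid_highlighting formatted_lines sequence target_amino_acids out) := by unfold Spec_apply_amino_acid_highlighting; infer_instance

-- ===== CLAIM (what is proved, stated in full; the proofs are below) =====
def Claim_equal_apply_amino_acid_highlighting : Prop := ∀ (formatted_lines : List String) (sequence : String) (target_amino_acids : String), Dom_apply_amino_acid_highlighting formatted_lines sequence target_amino_acids → Spec_apply_amino_acid_highlighting formatted_lines sequence target_amino_acids (apply_amino_acid_highlighting formatted_lines sequence target_amino_acids)

-- ===== LEMMAS AND PROOFS =====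

-- proof-side middle form of the per-nucleotide condition, in terms of A's dict lookup
def pvCondMid (clean : List Char) (aas : PySem.Set (List Char)) (pos : Int) : Bool :=
  let c := pos - PySem.Int.mod pos 3
  let codon := PySem.List.slice clean (some c) (some (c + 3))
  codon.length == 3 &&
    (match pvGeneticCode.get? codon with
     | some aa => aas.contains aa
     | none => false)

theorem pv_mod3 (p : Int) : PySem.Int.mod p 3 = p % 3 := by
  simp [PySem.Int.mod, Int.fmod_eq_emod]

theorem pv_join_nil_flatten : ∀ ls : List (List Char), PySem.Chars.join [] ls = ls.flatten
  | [] => PySem.Chars.join_nil []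
  | [p] => by rw [PySem.Chars.join_singleton]; simp
  | p :: q :: rest => by
      rw [PySem.Chars.join_cons_cons]; simp [pv_join_nil_flatten (q :: rest)]

theorem pv_join_append (ls : List (List Char)) (x : List Char) :
    PySem.Chars.join [] (ls ++ [x]) = PySem.Chars.join [] ls ++ x := by
  simp [pv_join_nil_flatten]

theorem pv_mem_update {α : Type} [BEq α] [LawfulBEq α] (s : PySem.Set α) (xs : List α) (p : α) :
    p ∈ PySem.Set.update s xs ↔ p ∈ s ∨ p ∈ xs := by
  rw [PySem.Set.update_eq_append_filter]
  by_cases h : p ∈ s <;>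
    simp [List.mem_filter, PySem.Set.mem_ofList, PySem.Set.contains, h]

theorem pv_mem_foldl_update (cond : Int → Bool) :
    ∀ (l : List Int) (s0 : PySem.Set Int) (p : Int),
      (p ∈ l.foldl (fun hp i => if cond i then PySem.Set.update hp [i, i + 1, i + 2] else hp) s0
        ↔ p ∈ s0 ∨ ∃ i ∈ l, cond i ∧ (p = i ∨ p = i + 1 ∨ p = i + 2))
  | [], s0, p => by simp
  | i :: t, s0, p => by
      rw [List.foldl_cons, pv_mem_foldl_update cond t _ p]
      by_cases hc : cond i
      · rw [if_pos hc]
        constructor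
        · rintro (hu | ⟨j, hj, hcj, hp⟩)
          · rcases (pv_mem_update s0 [i, i + 1, i + 2] p).mp hu with h | h
            · exact Or.inl h
            · refine Or.inr ⟨i, List.mem_cons_self, hc, ?_⟩
              simpa using h
          · exact Or.inr ⟨j, List.mem_cons_of_mem i hj, hcj, hp⟩
        · rintro (h | ⟨j, hj, hcj, hp⟩)
          · exact Or.inl ((pv_mem_update s0 [i, i + 1, i + 2] p).mpr (Or.inl h))
          · rcases List.mem_cons.mp hj with rfl | hj'
            · exact Or.inl ((pv_mem_update s0 [j, j + 1, j + 2] p).mpr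
                (Or.inr (by simpa using hp)))
            · exact Or.inr ⟨j, hj', hcj, hp⟩
      · rw [if_neg hc]
        constructor
        · rintro (h | ⟨j, hj, hcj, hp⟩)
          · exact Or.inl h
          · exact Or.inr ⟨j, List.mem_cons_of_mem i hj, hcj, hp⟩
        · rintro (h | ⟨j, hj, hcj, hp⟩)
          · exact Or.inl h
          · rcases List.mem_cons.mp hj with rfl | hj'
            · exact absurd hcj (by simp [hc])
            · exact Or.inr ⟨j, hj', hcj, hp⟩

theorem pv_contains_fst_filter {α β : Type} [BEq α] [LawfulBEq α] (p : α × β → Bool) :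
    ∀ (l : List (α × β)) (_ : (l.map Prod.fst).Nodup) (x : α),
      ((l.filter p).map Prod.fst).contains x
        = (match l.find? (fun kv => kv.1 == x) with
           | some kv => p kv
           | none => false)
  | [], _, x => by simp
  | (k, v) :: t, h, x => by
      have ht : (t.map Prod.fst).Nodup := (List.nodup_cons.mp h).2
      by_cases hkx : k = x
      · subst hkx
        have hk : k ∉ t.map Prod.fst := (List.nodup_cons.mp h).1
        by_cases hp : p (k, v)
        · simp [List.filter_cons, hp]
        · have : ((t.filter p).map Prod.fst).contains k = false := by
            rw [Bool.eq_false_iff]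
            intro habs
            have hm : k ∈ (t.filter p).map Prod.fst := by
              simpa [List.contains_eq_mem] using habs
            obtain ⟨kv, hkvmem, hfst⟩ := List.mem_map.mp hm
            exact hk (List.mem_map.mpr ⟨kv, (List.mem_filter.mp hkvmem).1, hfst⟩)
          simp [List.filter_cons, hp, List.find?_cons, this]
          exact fun b hb => False.elim (hk (List.mem_map.mpr ⟨(k, b), hb, rfl⟩))
      · have hne : (k == x) = false := by simp [hkx]
        have hxk : (x == k) = false := by simp [Ne.symm hkx]
        by_cases hp : p (k, v) <;>
          simp [List.filter_cons, hp, List.find?_cons, hne, hxk,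
            ← List.contains_eq_mem, pv_contains_fst_filter p t ht x]

theorem pv_gc_keys_nodup : (pvGeneticCode.items.map Prod.fst).Nodup := by decide

theorem pv_contains_targetCodons (aas : PySem.Set (List Char)) (x : List Char) :
    (pvTargetCodons aas).contains x
      = (match pvGeneticCode.get? x with
         | some aa => aas.contains aa
         | none => false) := by
  have h1 : pvTargetCodons aas
      = (pvGeneticCode.items.filter (fun kv => aas.contains kv.2)).map Prod.fst := by
    unfold pvTargetCodons
    rw [PySem.List.foldl_append_if (fun kv => aas.contains kv.2) Prod.fst]
    simp
  rw [h1, pv_contains_fst_filter (fun kv => aas.contains kv.2) pvGeneticCode.items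
        pv_gc_keys_nodup x]
  show _ = (match Option.map Prod.snd (pvGeneticCode.items.find? (fun kv => kv.1 == x)) with
            | some aa => aas.contains aa
            | none => false)
  cases pvGeneticCode.items.find? (fun kv => kv.1 == x) <;> rfl

theorem pv_slice_len (clean : List Char) (c : Int) (hc : 0 ≤ c) :
    ((PySem.List.slice clean (some c) (some (c + 3))).length = 3 ↔
      c + 3 ≤ (clean.length : Int)) := by
  rw [PySem.List.length_slice]
  have h1 : PySem.List.clampIdx clean.length c = min c.toNat clean.length := by
    rw [← Int.toNat_of_nonneg hc, PySem.List.clampIdx_natCast]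
    omega
  have h2 : PySem.List.clampIdx clean.length (c + 3) = min (c.toNat + 3) clean.length := by
    rw [show c + 3 = ((c.toNat + 3 : Nat) : Int) by omega, PySem.List.clampIdx_natCast]
  rw [h1, h2]; omega

theorem pv_key (clean : List Char) (aas : PySem.Set (List Char)) (p : Int) (hp0 : 0 ≤ p) :
    PySem.Set.contains (pvHighlights clean (pvTargetCodons aas)) p = pvCondMid clean aas p := by
  have hmem : p ∈ pvHighlights clean (pvTargetCodons aas) ↔
      ∃ i ∈ PySem.List.pyRange 0 ((clean.length : Int) - 2) 3,
        pvCondA clean (pvTargetCodons aas) i ∧ (p = i ∨ p = i + 1 ∨ p = i + 2) := by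
    unfold pvHighlights
    rw [pv_mem_foldl_update]
    simp [PySem.Set.empty]
  have hkey : p ∈ pvHighlights clean (pvTargetCodons aas) ↔ pvCondMid clean aas p = true := by
    rw [hmem]
    unfold pvCondMid
    rw [pv_mod3]
    have hc0 : 0 ≤ p - p % 3 := by omega
    constructor
    · rintro ⟨i, hir, hcA, hpi⟩
      rw [PySem.List.mem_pyRange_iff_of_pos (by norm_num)] at hir
      obtain ⟨hi0, hin, hdvd⟩ := hir
      have hieq : i = p - p % 3 := by omega
      subst hieq
      unfold pvCondA at hcA
      simp only [Bool.and_eq_true, beq_iff_eq] at hcA ⊢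
      refine ⟨hcA.1, ?_⟩
      rw [← pv_contains_targetCodons aas]
      exact hcA.2
    · intro hB
      simp only [Bool.and_eq_true, beq_iff_eq] at hB
      obtain ⟨hlen, hmatch⟩ := hB
      refine ⟨p - p % 3, ?_, ?_, by omega⟩
      · rw [PySem.List.mem_pyRange_iff_of_pos (by norm_num)]
        have := (pv_slice_len clean (p - p % 3) hc0).mp hlen
        refine ⟨by omega, by omega, by omega⟩
      · unfold pvCondA
        simp only [Bool.and_eq_true, beq_iff_eq]
        exact ⟨hlen, by rw [pv_contains_targetCodons aas]; exact hmatch⟩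
  cases hB : pvCondMid clean aas p with
  | true =>
      have : p ∈ pvHighlights clean (pvTargetCodons aas) := hkey.mpr hB
      simpa [PySem.Set.contains, List.contains_eq_mem] using this
  | false =>
      have : p ∉ pvHighlights clean (pvTargetCodons aas) := fun h => by
        simp [hkey.mp h] at hB
      simpa [PySem.Set.contains, List.contains_eq_mem] using this

-- B's target set has the same element list as A's
theorem pv_targets_eq (t : String) : pvTargetsB t = pvTargetAAs t := by
  unfold pvTargetsB pvTargetAAs
  split_ifs <;> first | rfl | decide

theorem pv_find_single_neg (b : Char) (h : b ∉ pvBases) : PySem.Chars.find pvBases [b] = -1 := by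
  rw [PySem.Chars.find_eq_neg_one_iff]
  intro hinf
  exact h (hinf.subset (List.mem_singleton_self b))

theorem pv_get_none_first (a b c : Char) (h : a ∉ pvBases) :
    pvGeneticCode.get? [a, b, c] = none := by
  have h1 : a ≠ 'T' := fun e => h (by simp [pvBases, e])
  have h2 : a ≠ 'C' := fun e => h (by simp [pvBases, e])
  have h3 : a ≠ 'A' := fun e => h (by simp [pvBases, e])
  have h4 : a ≠ 'G' := fun e => h (by simp [pvBases, e])
  simp [pvGeneticCode, PySem.Dict.get?, Ne.symm h1, Ne.symm h2, Ne.symm h3, Ne.symm h4]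

theorem pv_get_none_second (a b c : Char) (ha : a ∈ pvBases) (h : b ∉ pvBases) :
    pvGeneticCode.get? [a, b, c] = none := by
  have h1 : b ≠ 'T' := fun e => h (by simp [pvBases, e])
  have h2 : b ≠ 'C' := fun e => h (by simp [pvBases, e])
  have h3 : b ≠ 'A' := fun e => h (by simp [pvBases, e])
  have h4 : b ≠ 'G' := fun e => h (by simp [pvBases, e])
  fin_cases ha <;>
    simp [pvGeneticCode, PySem.Dict.get?, Ne.symm h1, Ne.symm h2, Ne.symm h3, Ne.symm h4]

theorem pv_get_none_third (a b c : Char) (ha : a ∈ pvBases) (hb : b ∈ pvBases)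
    (h : c ∉ pvBases) : pvGeneticCode.get? [a, b, c] = none := by
  have h1 : c ≠ 'T' := fun e => h (by simp [pvBases, e])
  have h2 : c ≠ 'C' := fun e => h (by simp [pvBases, e])
  have h3 : c ≠ 'A' := fun e => h (by simp [pvBases, e])
  have h4 : c ≠ 'G' := fun e => h (by simp [pvBases, e])
  fin_cases ha <;> fin_cases hb <;>
    simp [pvGeneticCode, PySem.Dict.get?, Ne.symm h1, Ne.symm h2, Ne.symm h3, Ne.symm h4]

-- the heart of the equivalence: dict lookup = table lookup, for every 3-char codon
theorem pv_codon_bridge (a b c : Char) :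
    pvGeneticCode.get? [a, b, c] = pvCodonAA [a, b, c] 0 := by
  have eT : PySem.Chars.find pvBases ['T'] = 0 := by decide
  have eC : PySem.Chars.find pvBases ['C'] = 1 := by decide
  have eA : PySem.Chars.find pvBases ['A'] = 2 := by decide
  have eG : PySem.Chars.find pvBases ['G'] = 3 := by decide
  by_cases ha : a ∈ pvBases
  · by_cases hb : b ∈ pvBases
    · by_cases hc : c ∈ pvBases
      · fin_cases ha <;> fin_cases hb <;> fin_cases hc <;> decide
      · rw [pv_get_none_third a b c ha hb hc]
        have hf := pv_find_single_neg c hc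
        fin_cases ha <;> fin_cases hb <;> simp [pvCodonAA, hf, eT, eC, eA, eG]
    · rw [pv_get_none_second a b c ha hb]
      have hf := pv_find_single_neg b hb
      fin_cases ha <;> simp [pvCodonAA, hf, eT, eC, eA, eG]
  · rw [pv_get_none_first a b c ha]
    have hf := pv_find_single_neg a ha
    simp [pvCodonAA, hf]

theorem pv_cond_eq (clean : List Char) (t : String) (pos : Int) (hpos : 0 ≤ pos) :
    pvCondB clean (pvTargetsB t) pos = pvCondMid clean (pvTargetAAs t) pos := by
  unfold pvCondB pvCondMid
  rw [pv_targets_eq, pv_mod3]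
  have hstart : PySem.Int.floordiv pos 3 * 3 = pos - pos % 3 := by
    simp [PySem.Int.floordiv, Int.fdiv_eq_ediv]
    omega
  rw [hstart]
  rcases hcodon : PySem.List.slice clean (some (pos - pos % 3)) (some (pos - pos % 3 + 3))
    with _ | ⟨a, _ | ⟨b, _ | ⟨c, _ | rest⟩⟩⟩ <;> simp_all [pv_codon_bridge]

theorem pv_char_fold (clean : List Char) (t : String) :
    ∀ (cs : List Char) (la : List Char) (lb : List (List Char)) (pos : Int),
      0 ≤ pos → la = PySem.Chars.join [] lb →
      (cs.foldl (pvCharStepA (pvHighlights clean (pvTargetCodons (pvTargetAAs t)))) (la, pos)).1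
          = PySem.Chars.join [] (cs.foldl (pvCharStepB clean (pvTargetsB t)) (lb, pos)).1
        ∧ (cs.foldl (pvCharStepA (pvHighlights clean (pvTargetCodons (pvTargetAAs t)))) (la, pos)).2
          = (cs.foldl (pvCharStepB clean (pvTargetsB t)) (lb, pos)).2
        ∧ 0 ≤ (cs.foldl (pvCharStepA (pvHighlights clean (pvTargetCodons (pvTargetAAs t)))) (la, pos)).2
  | [], la, lb, pos, hpos, hlab => by simpa using ⟨hlab, hpos⟩
  | ch :: cs, la, lb, pos, hpos, hlab => by
      rw [List.foldl_cons, List.foldl_cons]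
      by_cases hA : "ATGCN".toList.contains ch
      · have hA' : ch = 'A' ∨ ch = 'T' ∨ ch = 'G' ∨ ch = 'C' ∨ ch = 'N' := by
          simpa using hA
        have hk : PySem.Set.contains (pvHighlights clean (pvTargetCodons (pvTargetAAs t))) pos
            = pvCondB clean (pvTargetsB t) pos := by
          rw [pv_key clean (pvTargetAAs t) pos hpos, pv_cond_eq clean t pos hpos]
        have hk2 : pos ∈ pvHighlights clean (pvTargetCodons (pvTargetAAs t)) ↔
            pvCondB clean (pvTargetsB t) pos = true := by
          rw [← hk]; simp [PySem.Set.contains, List.contains_eq_mem]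
        by_cases hcnd : pvCondB clean (pvTargetsB t) pos = true
        · rw [show pvCharStepA (pvHighlights clean (pvTargetCodons (pvTargetAAs t))) (la, pos) ch
                = (la ++ pvSpan ch, pos + 1) by simp [pvCharStepA, hA', hk2.mpr hcnd],
              show pvCharStepB clean (pvTargetsB t) (lb, pos) ch = (lb ++ [pvSpanB ch], pos + 1) by
                simp [pvCharStepB, hA', hcnd]]
          exact pv_char_fold clean t cs _ _ _ (by omega)
            (by rw [pv_join_append, ← hlab]; rfl)
        · rw [show pvCharStepA (pvHighlights clean (pvTargetCodons (pvTargetAAs t))) (la, pos) ch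
                = (la ++ [ch], pos + 1) by
                  simp only [pvCharStepA]
                  rw [if_pos (by simpa using hA'), if_neg (by
                    intro h; exact hcnd (hk2.mp (by simpa [PySem.Set.contains, List.contains_eq_mem] using h)))],
              show pvCharStepB clean (pvTargetsB t) (lb, pos) ch = (lb ++ [[ch]], pos + 1) by
                simp [pvCharStepB, hA', Bool.eq_false_iff.mpr hcnd]]
          exact pv_char_fold clean t cs _ _ _ (by omega)
            (by rw [pv_join_append, ← hlab])
      · have hA' : ¬(ch = 'A' ∨ ch = 'T' ∨ ch = 'G' ∨ ch = 'C' ∨ ch = 'N') := by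
          simpa using hA
        rw [show pvCharStepA (pvHighlights clean (pvTargetCodons (pvTargetAAs t))) (la, pos) ch
              = (la ++ [ch], pos) by simp [pvCharStepA, hA'],
            show pvCharStepB clean (pvTargetsB t) (lb, pos) ch = (lb ++ [[ch]], pos) by
              simp [pvCharStepB, hA']]
        exact pv_char_fold clean t cs _ _ _ hpos (by rw [pv_join_append, ← hlab])

theorem pv_line_fold (clean : List Char) (t : String) :
    ∀ (fl : List String) (acc : List String) (pos : Int), 0 ≤ pos →
      fl.foldl (pvLineStepA (pvHighlights clean (pvTargetCodons (pvTargetAAs t)))) (acc, pos)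
        = fl.foldl (pvLineStepB clean (pvTargetsB t)) (acc, pos)
  | [], _, _, _ => rfl
  | line :: fl, acc, pos, hpos => by
      rw [List.foldl_cons, List.foldl_cons]
      rcases hparts : (PySem.Str.splitMax? line ": " 1).getD [] with _ | ⟨a, _ | ⟨b, _ | ⟨c, rest⟩⟩⟩
      · rw [show pvLineStepA (pvHighlights clean (pvTargetCodons (pvTargetAAs t))) (acc, pos) line
              = (acc ++ [line], pos) by simp [pvLineStepA, hparts],
            show pvLineStepB clean (pvTargetsB t) (acc, pos) line = (acc ++ [line], pos) by
              simp [pvLineStepB, hparts]]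
        exact pv_line_fold clean t fl _ _ hpos
      · rw [show pvLineStepA (pvHighlights clean (pvTargetCodons (pvTargetAAs t))) (acc, pos) line
              = (acc ++ [line], pos) by simp [pvLineStepA, hparts],
            show pvLineStepB clean (pvTargetsB t) (acc, pos) line = (acc ++ [line], pos) by
              simp [pvLineStepB, hparts]]
        exact pv_line_fold clean t fl _ _ hpos
      · obtain ⟨h1, h2, h3⟩ := pv_char_fold clean t b.toList [] [] pos hpos
          (PySem.Chars.join_nil []).symm
        rw [show pvLineStepA (pvHighlights clean (pvTargetCodons (pvTargetAAs t))) (acc, pos) line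
              = (acc ++ [String.ofList (a.toList ++ ':' :: ' ' ::
                  (b.toList.foldl (pvCharStepA (pvHighlights clean (pvTargetCodons (pvTargetAAs t)))) ([], pos)).1)],
                 (b.toList.foldl (pvCharStepA (pvHighlights clean (pvTargetCodons (pvTargetAAs t)))) ([], pos)).2)
              by simp [pvLineStepA, hparts],
            show pvLineStepB clean (pvTargetsB t) (acc, pos) line
              = (acc ++ [String.ofList (a.toList ++ ':' :: ' ' ::
                  PySem.Chars.join [] (b.toList.foldl (pvCharStepB clean (pvTargetsB t)) ([], pos)).1)],
                 (b.toList.foldl (pvCharStepB clean (pvTargetsB t)) ([], pos)).2)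
              by simp [pvLineStepB, hparts]]
        rw [h1, h2]
        exact pv_line_fold clean t fl _ _ (h2 ▸ h3)
      · rw [show pvLineStepA (pvHighlights clean (pvTargetCodons (pvTargetAAs t))) (acc, pos) line
              = (acc ++ [line], pos) by simp [pvLineStepA, hparts],
            show pvLineStepB clean (pvTargetsB t) (acc, pos) line = (acc ++ [line], pos) by
              simp [pvLineStepB, hparts]]
        exact pv_line_fold clean t fl _ _ hpos

-- ===== VERDICT (by name: the statement is the Claim_ definition above) =====
theorem apply_amino_acid_highlighting_spec : Claim_equal_apply_amino_acid_highlighting := by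
  intro fl seq t _
  show apply_amino_acid_highlighting fl seq t = apply_amino_acid_highlighting_alt fl seq t
  exact congrArg Prod.fst (pv_line_fold (pvClean seq) t fl [] 0 le_rfl)
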